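-- pv_equiv track=rewrite | github.com/tgen/jetstream | jetstream/legacy/config.py | _group_sample_lines
-- ===== SOURCE A (Python) =====
-- class ConfigParsingException(Exception):
--     """ Raised when config files contain syntax errors """
--
-- def _group_sample_lines(lines):
--     """ Groups sample lines together with data lines """
--     samples = []
--
--     sample_iter = iter(lines)
--     line = next(sample_iter)
--
--     if line.startswith('SAMPLE='):
--         current_group = [line]
--     else:
--         raise ConfigParsingException('Sample lines should start with SAMPLE')
--
--     while 1:
--         try:
--             line = next(sample_iter)
--         except StopIteration:
--             if current_group:
--                 samples.append(current_group)
--             break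
--
--         if line.startswith('SAMPLE='):
--             samples.append(current_group)
--             current_group = [line]
--         else:
--             current_group.append(line)
--
--     return samples
-- ===== SOURCE B (Python) =====
-- class ConfigParsingException(Exception):
--     """ Raised when config files contain syntax errors """
--
-- def _group_sample_lines(lines):
--     """ Groups sample lines together with data lines """
--     lines = list(lines)
--     if lines and not lines[0].startswith('SAMPLE='):
--         raise ConfigParsingException('Sample lines should start with SAMPLE')
--     starts = [i for i, line in enumerate(lines) if line.startswith('SAMPLE=')]
--     return [lines[s:e] for s, e in zip(starts, starts[1:] + [len(lines)])]
-- ===== Notes on version B (the rewrite author's own statement) =====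
-- stated objective: alternative
-- what changed: Replaces A's single-pass iterator/try-except loop with a mutable current_group accumulator by a two-stage algorithm: first collect the indices of all 'SAMPLE=' marker lines, then cut the list into slices between consecutive marker indices.
import Mathlib
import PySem

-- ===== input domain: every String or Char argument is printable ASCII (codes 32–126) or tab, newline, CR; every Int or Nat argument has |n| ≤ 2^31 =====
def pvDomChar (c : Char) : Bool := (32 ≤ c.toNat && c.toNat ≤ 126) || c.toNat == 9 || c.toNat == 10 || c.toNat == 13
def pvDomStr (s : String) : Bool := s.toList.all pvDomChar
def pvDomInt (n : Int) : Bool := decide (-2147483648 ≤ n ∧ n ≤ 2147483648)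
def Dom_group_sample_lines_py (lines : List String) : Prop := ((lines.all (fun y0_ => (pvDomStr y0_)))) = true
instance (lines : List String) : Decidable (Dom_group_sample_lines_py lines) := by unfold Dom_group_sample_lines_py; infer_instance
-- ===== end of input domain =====

-- B replaces A's single-pass iterator/accumulator loop by two stages: first collect the
-- indices of all 'SAMPLE=' marker lines, then cut the list into slices between
-- consecutive marker indices (objective: alternative algorithm, same cost).

-- ===== PORT A =====
-- A's while-loop: state = (current_group, samples); ends by appending current_group if nonempty.
def groupLoopA (rest : List String) (current : List String) (samples : List (List String)) :
    List (List String) :=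
  match rest with
  | [] => if current ≠ [] then samples ++ [current] else samples
  | l :: rs =>
      if PySem.Str.startswith l "SAMPLE=" then
        groupLoopA rs [l] (samples ++ [current])
      else
        groupLoopA rs (current ++ [l]) samples

def group_sample_lines_py (lines : List String) : List (List String) :=
  match lines with
  | [] => []  -- A raises StopIteration here (excluded by Pre_)
  | l :: rest =>
      if PySem.Str.startswith l "SAMPLE=" then
        groupLoopA rest [l] []
      else
        []  -- A raises ConfigParsingException here (excluded by Pre_)

-- ===== PORT B =====
-- B stage 1: starts = [i for i, line in enumerate(lines) if line.startswith('SAMPLE=')]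
def markerStartsB (lines : List String) : List Int :=
  (PySem.List.enumerate lines 0).filterMap
    (fun p => if PySem.Str.startswith p.2 "SAMPLE=" then some p.1 else none)

-- B stage 2: [lines[s:e] for s, e in zip(starts, starts[1:] + [len(lines)])]
def sliceGroupsB (lines : List String) : List (List String) :=
  let starts := markerStartsB lines
  (starts.zip (starts.drop 1 ++ [(lines.length : Int)])).map
    (fun p => PySem.List.slice lines (some p.1) (some p.2))

def group_sample_lines_py_alt (lines : List String) : List (List String) :=
  if lines ≠ [] ∧ ¬ PySem.Str.startswith lines.head! "SAMPLE=" then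
    []  -- B raises ConfigParsingException here (excluded by Pre_)
  else
    sliceGroupsB lines

-- ===== PRECONDITION & SPEC =====
-- Pre_ excludes exactly the inputs on which A raises: the empty list (uncaught
-- StopIteration) and lists whose first line does not start with 'SAMPLE='
-- (ConfigParsingException).
def Pre_group_sample_lines_py (lines : List String) : Prop :=
  lines ≠ [] ∧ PySem.Str.startswith lines.head! "SAMPLE=" = true
instance (lines : List String) : Decidable (Pre_group_sample_lines_py lines) := by
  unfold Pre_group_sample_lines_py; infer_instance

def pvWitness_group_sample_lines_py : List String := ["SAMPLE=a", "x 1", "SAMPLE=b"]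

def Spec_group_sample_lines_py (lines : List String) (out : List (List String)) : Prop :=
  out = group_sample_lines_py_alt lines
instance (lines : List String) (out : List (List String)) :
    Decidable (Spec_group_sample_lines_py lines out) := by
  unfold Spec_group_sample_lines_py; infer_instance

-- ===== CLAIM =====
def Claim_equal_group_sample_lines_py : Prop :=
  ∀ (lines : List String), Dom_group_sample_lines_py lines →
    Pre_group_sample_lines_py lines →
    Spec_group_sample_lines_py lines (group_sample_lines_py lines)

-- ===== LEMMAS AND PROOFS =====

-- Common specification: cut at each marker line, one group per marker.
def nmB (s : String) : Bool := !(PySem.Str.startswith s "SAMPLE=")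

def groupsRec : List String → List (List String)
  | [] => []
  | l :: rest =>
      (l :: rest.takeWhile nmB) :: groupsRec (rest.dropWhile nmB)
termination_by ls => ls.length
decreasing_by
  simpa using Nat.lt_succ_of_le (List.length_dropWhile_le nmB rest)

-- startswith in the Chars normal form simp produces
theorem sw_true {l : String} (h : PySem.Str.startswith l "SAMPLE=" = true) :
    PySem.Chars.startswith l.toList ['S', 'A', 'M', 'P', 'L', 'E', '='] = true := by
  simpa using h

theorem sw_false {l : String} (h : ¬ PySem.Str.startswith l "SAMPLE=" = true) :
    PySem.Chars.startswith l.toList ['S', 'A', 'M', 'P', 'L', 'E', '='] = false := by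
  simpa using h

-- ---- A's loop computes groupsRec ----
theorem groupLoopA_eq_groupsRec (rest : List String) (current : List String)
    (samples : List (List String)) (h : current ≠ []) :
    groupLoopA rest current samples =
      samples ++ (current ++ rest.takeWhile nmB) :: groupsRec (rest.dropWhile nmB) := by
  induction rest generalizing current samples with
  | nil => simp [groupLoopA, h, groupsRec]
  | cons l rs ih =>
      by_cases hs : PySem.Str.startswith l "SAMPLE=" = true
      · have hnm : nmB l = false := by
          unfold nmB
          rw [hs]
          rfl
        rw [groupLoopA, if_pos hs, ih _ _ (by simp)]
        simp [List.dropWhile_cons, hnm, groupsRec]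
      · have hnm : nmB l = true := by
          unfold nmB
          rw [Bool.not_eq_true (PySem.Str.startswith l "SAMPLE=")] at hs
          rw [hs]
          rfl
        rw [groupLoopA, if_neg hs, ih _ _ (by simp [h])]
        simp [List.dropWhile_cons, hnm]

-- ---- B computes groupsRec ----

-- nat-indexed marker positions (proof helper)
def natStarts : List String → List Nat
  | [] => []
  | l :: rs =>
      (if PySem.Str.startswith l "SAMPLE=" then [0] else []) ++ (natStarts rs).map (· + 1)

theorem markerStarts_shift (xs : List String) (s : Int) :
    (PySem.List.enumerate xs s).filterMap
        (fun p => if PySem.Str.startswith p.2 "SAMPLE=" then some p.1 else none) =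
      (natStarts xs).map (fun (k : Nat) => s + (k : Int)) := by
  induction xs generalizing s with
  | nil => simp [PySem.List.enumerate_nil, natStarts]
  | cons l rs ih =>
      rw [PySem.List.enumerate_cons, List.filterMap_cons, ih]
      by_cases hs : PySem.Str.startswith l "SAMPLE=" = true
      · simp only [natStarts, hs, if_true, List.singleton_append, List.map_cons,
          List.map_map]
        congr 1
        · omega
        · apply List.map_congr_left
          intro k _
          simp
          omega
      · simp only [natStarts, hs, if_false, Bool.false_eq_true, List.nil_append,
          List.map_map]
        apply List.map_congr_left
        intro k _
        simp
        omega

theorem markerStartsB_eq (lines : List String) :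
    markerStartsB lines = (natStarts lines).map (fun (k : Nat) => (k : Int)) := by
  rw [markerStartsB, markerStarts_shift]
  apply List.map_congr_left
  intro k _
  omega

theorem natStarts_append (xs ys : List String) :
    natStarts (xs ++ ys) = natStarts xs ++ (natStarts ys).map (· + xs.length) := by
  induction xs with
  | nil => simp [natStarts]
  | cons l rs ih =>
      simp only [List.cons_append, natStarts, ih, List.map_append, List.map_map,
        List.append_assoc, List.length_cons]
      have hc : ((fun x => x + 1) ∘ fun x => x + rs.length) = (fun x : Nat => x + (rs.length + 1)) := by
        funext x
        simp only [Function.comp_apply]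
        omega
      rw [hc]

theorem natStarts_none (xs : List String) (h : ∀ x ∈ xs, nmB x = true) :
    natStarts xs = [] := by
  induction xs with
  | nil => rfl
  | cons l rs ih =>
      have hl : PySem.Str.startswith l "SAMPLE=" ≠ true := by
        have := h l (by simp)
        simpa [nmB] using this
      simp [natStarts, sw_false hl, ih (fun x hx => h x (by simp [hx]))]

-- slicing with nat cut points, as drop/take (proof helper)
def cutSlices (lines : List String) : List Nat → List (List String)
  | [] => []
  | [c] => [lines.drop c]
  | c :: c' :: cs => (lines.drop c).take (c' - c) :: cutSlices lines (c' :: cs)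

theorem zip_slices_eq_cutSlices (lines : List String) (cs : List Nat) :
    ((cs.map (fun (k : Nat) => (k : Int))).zip ((cs.map (fun (k : Nat) => (k : Int))).drop 1 ++ [(lines.length : Int)])).map
        (fun p => PySem.List.slice lines (some p.1) (some p.2)) =
      cutSlices lines cs := by
  induction cs with
  | nil => simp [cutSlices]
  | cons c cs ih =>
      cases cs with
      | nil =>
          simp only [List.map_cons, List.map_nil, List.drop_succ_cons, List.drop_nil,
            List.nil_append, List.zip_cons_cons, List.zip_nil_right, List.map_cons,
            List.map_nil, cutSlices]
          congr 1
          rw [PySem.List.slice_natCast]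
          apply List.take_of_length_le
          simp
      | cons c' cs' =>
          simp only [List.map_cons, List.drop_succ_cons, List.drop_zero, List.cons_append,
            List.zip_cons_cons, List.map_cons, cutSlices] at ih ⊢
          rw [PySem.List.slice_natCast, ih]

-- shifting all cut points past a prefix slices the suffix
theorem cutSlices_shift (pre d : List String) (cs : List Nat) :
    cutSlices (pre ++ d) (cs.map (· + pre.length)) = cutSlices d cs := by
  induction cs with
  | nil => simp [cutSlices]
  | cons c cs ih =>
      cases cs with
      | nil =>
          simp only [List.map_cons, List.map_nil, cutSlices]
          rw [show c + pre.length = pre.length + c by omega,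
            List.drop_length_add_append]
      | cons c' cs' =>
          simp only [List.map_cons, cutSlices] at ih ⊢
          rw [ih]
          congr 1
          rw [show c + pre.length = pre.length + c by omega,
            List.drop_length_add_append,
            show c' + pre.length - (pre.length + c) = c' - c by omega]

-- the core B lemma: on a list whose first line is a marker, the slice decomposition
-- equals groupsRec
theorem cutSlices_natStarts (n : Nat) :
    ∀ (m : String) (rest : List String), (m :: rest).length ≤ n →
      PySem.Str.startswith m "SAMPLE=" = true →
      cutSlices (m :: rest) (natStarts (m :: rest)) = groupsRec (m :: rest) := by
  induction n with
  | zero => intro m rest h; simp at h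
  | succ n ih =>
      intro m rest hlen hm
      have hsplit : rest = rest.takeWhile nmB ++ rest.dropWhile nmB :=
        (List.takeWhile_append_dropWhile).symm
      set t := rest.takeWhile nmB with ht
      set d := rest.dropWhile nmB with hd
      have hto : ∀ x ∈ t, nmB x = true := fun x hx => List.mem_takeWhile_imp hx
      have hpre : m :: rest = (m :: t) ++ d := by rw [hsplit]; simp
      have hns : natStarts (m :: rest) =
          0 :: (natStarts d).map (· + (m :: t).length) := by
        rw [hpre, natStarts_append]
        have h1 : natStarts (m :: t) = [0] := by
          simp [natStarts, sw_true hm, natStarts_none t hto]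
        rw [h1]
        rfl
      rw [groupsRec, ← ht, ← hd, hns]
      rcases hdd : d with _ | ⟨l, d'⟩
      · -- no further markers: single group = whole list
        simp only [natStarts, List.map_nil, cutSlices]
        rw [hpre, hdd]
        simp [groupsRec]
      · -- d = l :: d', l is a marker
        have hl : PySem.Str.startswith l "SAMPLE=" = true := by
          have hdne : rest.dropWhile nmB ≠ [] := by rw [← hd, hdd]; simp
          have h2 := List.head_dropWhile_not nmB hdne
          have h3 : (rest.dropWhile nmB).head hdne = l := by
            have := hd.symm.trans hdd
            simp [this]
          rw [h3] at h2
          simpa [nmB] using h2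
        have hlen' : (l :: d').length ≤ n := by
          have h1 : d.length ≤ rest.length := by
            rw [hd]; exact List.length_dropWhile_le _ _
          rw [hdd] at h1
          simp only [List.length_cons] at hlen h1 ⊢
          omega
        have hnsd : natStarts (l :: d') = 0 :: (natStarts d').map (· + 1) := by
          simp [natStarts, sw_true hl]
        have htake : (m :: rest).take (m :: t).length = m :: t := by
          rw [hpre]; simp
        rw [hnsd]
        have hmapeq : (m :: t).length :: ((natStarts d').map (· + 1)).map (· + (m :: t).length) =
            (natStarts (l :: d')).map (· + (m :: t).length) := by
          rw [hnsd]
          simp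
        simp only [List.map_cons, Nat.zero_add, cutSlices, Nat.sub_zero, List.drop_zero]
        rw [htake, hmapeq, hpre, hdd, cutSlices_shift, ih l d' hlen' hl]

-- ===== VERDICT =====
theorem group_sample_lines_py_spec : Claim_equal_group_sample_lines_py := by
  intro lines _ hpre
  obtain ⟨hne, hstart⟩ := hpre
  match lines, hne with
  | l :: rest, _ =>
      have hs : PySem.Str.startswith l "SAMPLE=" = true := hstart
      unfold Spec_group_sample_lines_py group_sample_lines_py group_sample_lines_py_alt
      rw [if_neg (by simp [sw_true hs])]
      show (if PySem.Str.startswith l "SAMPLE=" = true then groupLoopA rest [l] [] else []) = _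
      rw [if_pos hs, groupLoopA_eq_groupsRec rest [l] [] (by simp)]
      rw [sliceGroupsB, markerStartsB_eq, zip_slices_eq_cutSlices,
        cutSlices_natStarts (l :: rest).length l rest le_rfl hs]
      simp [groupsRec]
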